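-- pv_equiv track=rewrite | github.com/Kensuke-Mitsuzawa/DocumentFeatureSelection | document_feature_selection/pmi/pmi_csr_matrix.py | preprocess_csr_matrix
-- ===== SOURCE A (Python) =====
-- from collections import namedtuple
--
-- PosTuple = namedtuple('PosTuple', ('doc_id', 'word_id', 'document_frequency'))
--
-- def get_data_col_row_values(doc_id, word, doc_freq, vocaburary):
--     col_value = vocaburary[word]
--     df_value = doc_freq
--
--     return PosTuple(doc_id, col_value, df_value)
--
-- def preprocess_csr_matrix(token_freq_document, vocabulary):
--     # MEMO 分散化可能
--     """This function makes information to make csr matrix. Data-list/Row-list/Col-list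
--
--     :param token_freq_document:
--     :param vocabulary:
--     :return:
--     """
--     assert isinstance(token_freq_document, list)
--
--     value_position_list = []
--     for doc_id, doc_freq_obj in enumerate(token_freq_document):
--         value_pairs = [
--             get_data_col_row_values(doc_id=doc_id, word=word, doc_freq=freq, vocaburary=vocabulary)
--             for word, freq
--             in doc_freq_obj.items()
--             ]
--         value_position_list += value_pairs
--
--     row, col, data = make_csr_list(value_position_list)
--
--     return row, col, data
--
-- def make_csr_list(value_position_list):
--     data = []
--     row = []
--     col = []
--     for position_tuple in value_position_list:
--         row.append(position_tuple.doc_id)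
--         col.append(position_tuple.word_id)
--         data.append(position_tuple.document_frequency)
--
--     return row, col, data
-- ===== SOURCE B (Python) =====
-- def preprocess_csr_matrix(token_freq_document, vocabulary):
--     assert isinstance(token_freq_document, list)
--     row, col, data = [], [], []
--     for doc_id, doc_freq_obj in enumerate(token_freq_document):
--         for word, freq in doc_freq_obj.items():
--             row.append(doc_id)
--             col.append(vocabulary[word])
--             data.append(freq)
--     return row, col, data
-- ===== Notes on version B (the rewrite author's own statement) =====
-- stated objective: simpler
-- what changed: One direct loop appending to row/col/data in place of A's two passes (building a list of namedtuples, then unpacking it in make_csr_list); the helper functions and the intermediate PosTuple list disappear.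
import Mathlib
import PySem

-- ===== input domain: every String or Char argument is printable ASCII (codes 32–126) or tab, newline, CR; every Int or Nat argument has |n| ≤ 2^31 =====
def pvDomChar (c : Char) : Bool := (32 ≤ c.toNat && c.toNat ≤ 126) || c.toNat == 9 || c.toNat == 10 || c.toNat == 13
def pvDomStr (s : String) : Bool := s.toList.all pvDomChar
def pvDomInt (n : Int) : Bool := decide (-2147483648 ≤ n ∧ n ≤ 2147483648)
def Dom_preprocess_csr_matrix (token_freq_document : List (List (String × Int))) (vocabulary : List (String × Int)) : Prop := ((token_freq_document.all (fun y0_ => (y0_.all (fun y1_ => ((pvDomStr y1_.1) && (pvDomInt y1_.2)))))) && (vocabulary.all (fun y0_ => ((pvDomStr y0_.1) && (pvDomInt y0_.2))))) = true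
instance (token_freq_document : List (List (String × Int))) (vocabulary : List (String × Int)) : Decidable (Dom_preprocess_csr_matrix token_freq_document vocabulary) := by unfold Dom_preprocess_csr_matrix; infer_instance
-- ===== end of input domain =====

-- B collapses A's two passes (namedtuple list + make_csr_list) into one loop appending
-- directly to row/col/data; return values are identical on Pre_ (no speed claim).

-- ===== PORT A =====
-- vocaburary[word]: Python raises KeyError when word is absent; Pre_ excludes that,
-- the .getD 0 default is never the claimed value.
def get_data_col_row_values (doc_id : Int) (word : String) (doc_freq : Int)
    (vocaburary : List (String × Int)) : Int × Int × Int :=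
  let col_value : Int := ((PySem.Dict.ofList vocaburary).get? word).getD 0
  let df_value := doc_freq
  (doc_id, col_value, df_value)

def make_csr_list (value_position_list : List (Int × Int × Int)) :
    List Int × List Int × List Int :=
  value_position_list.foldl
    (fun (s : List Int × List Int × List Int) t =>
      (s.1 ++ [t.1], s.2.1 ++ [t.2.1], s.2.2 ++ [t.2.2]))
    ([], [], [])

def preprocess_csr_matrix (token_freq_document : List (List (String × Int))) (vocabulary : List (String × Int)) : List Int × List Int × List Int :=
  let value_position_list :=
    (PySem.List.enumerate token_freq_document).foldl
      (fun (acc : List (Int × Int × Int)) p =>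
        acc ++ (PySem.Dict.ofList p.2).items.map
          (fun wf => get_data_col_row_values p.1 wf.1 wf.2 vocabulary))
      []
  make_csr_list value_position_list

-- ===== PORT B =====
def preprocess_csr_matrix_alt (token_freq_document : List (List (String × Int))) (vocabulary : List (String × Int)) : List Int × List Int × List Int :=
  (PySem.List.enumerate token_freq_document).foldl
    (fun (s : List Int × List Int × List Int) p =>
      (PySem.Dict.ofList p.2).items.foldl
        (fun (s : List Int × List Int × List Int) wf =>
          (s.1 ++ [p.1],
           s.2.1 ++ [((PySem.Dict.ofList vocabulary).get? wf.1).getD 0],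
           s.2.2 ++ [wf.2]))
        s)
    ([], [], [])

-- ===== PRECONDITION & SPEC =====
-- Pre_ excludes inputs where some document contains a word missing from the
-- vocabulary: there Python A (and B) raises KeyError.
def Pre_preprocess_csr_matrix (token_freq_document : List (List (String × Int))) (vocabulary : List (String × Int)) : Prop :=
  (token_freq_document.all (fun doc =>
    doc.all (fun p => vocabulary.any (fun q => q.1 == p.1)))) = true
instance (token_freq_document : List (List (String × Int))) (vocabulary : List (String × Int)) : Decidable (Pre_preprocess_csr_matrix token_freq_document vocabulary) := by unfold Pre_preprocess_csr_matrix; infer_instance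
def pvWitness_preprocess_csr_matrix : (List (List (String × Int))) × (List (String × Int)) :=
  ([[("a", 2), ("b", 1)], [("b", 5)]], [("a", 0), ("b", 3)])

def Spec_preprocess_csr_matrix (token_freq_document : List (List (String × Int))) (vocabulary : List (String × Int)) (out : List Int × List Int × List Int) : Prop := out = preprocess_csr_matrix_alt token_freq_document vocabulary
instance (token_freq_document : List (List (String × Int))) (vocabulary : List (String × Int)) (out : List Int × List Int × List Int) : Decidable (Spec_preprocess_csr_matrix token_freq_document vocabulary out) := by unfold Spec_preprocess_csr_matrix; infer_instance

-- ===== CLAIM (what is proved, stated in full; the proofs are below) =====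
def Claim_equal_preprocess_csr_matrix : Prop := ∀ (token_freq_document : List (List (String × Int))) (vocabulary : List (String × Int)), Dom_preprocess_csr_matrix token_freq_document vocabulary → Pre_preprocess_csr_matrix token_freq_document vocabulary → Spec_preprocess_csr_matrix token_freq_document vocabulary (preprocess_csr_matrix token_freq_document vocabulary)

-- ===== LEMMAS AND PROOFS =====

-- the step of make_csr_list, named for the lemmas
def csrStep (s : List Int × List Int × List Int) (t : Int × Int × Int) :
    List Int × List Int × List Int :=
  (s.1 ++ [t.1], s.2.1 ++ [t.2.1], s.2.2 ++ [t.2.2])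

-- per-document triple list used by both ports
def docTriples (vocabulary : List (String × Int)) (p : Int × List (String × Int)) :
    List (Int × Int × Int) :=
  (PySem.Dict.ofList p.2).items.map
    (fun wf => (p.1, ((PySem.Dict.ofList vocabulary).get? wf.1).getD 0, wf.2))

-- A's accumulation of the value_position_list is flatMap
lemma a_vpl (voc : List (String × Int)) :
    ∀ (e : List (Int × List (String × Int))) (acc : List (Int × Int × Int)),
    e.foldl (fun acc p => acc ++ (PySem.Dict.ofList p.2).items.map
        (fun wf => get_data_col_row_values p.1 wf.1 wf.2 voc)) acc
      = acc ++ e.flatMap (docTriples voc) := by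
  intro e
  induction e with
  | nil => intro acc; simp
  | cons p es ih =>
      intro acc
      rw [List.foldl_cons, ih, List.flatMap_cons, ← List.append_assoc]
      rfl

-- B's nested fold is csrStep folded over the flattened triples
lemma b_fold (voc : List (String × Int)) :
    ∀ (e : List (Int × List (String × Int))) (s : List Int × List Int × List Int),
    e.foldl (fun s p => (PySem.Dict.ofList p.2).items.foldl
        (fun (s : List Int × List Int × List Int) wf =>
          (s.1 ++ [p.1], s.2.1 ++ [((PySem.Dict.ofList voc).get? wf.1).getD 0],
           s.2.2 ++ [wf.2])) s) s
      = (e.flatMap (docTriples voc)).foldl csrStep s := by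
  intro e
  induction e with
  | nil => intro s; simp
  | cons p es ih =>
      intro s
      rw [List.foldl_cons, ih, List.flatMap_cons, List.foldl_append]
      congr 1
      rw [docTriples, List.foldl_map]
      rfl

-- ===== VERDICT (by name: the statement is the Claim_ definition above) =====
theorem preprocess_csr_matrix_spec : Claim_equal_preprocess_csr_matrix := by
  intro tfd voc _ _
  unfold Spec_preprocess_csr_matrix preprocess_csr_matrix preprocess_csr_matrix_alt
  rw [b_fold, a_vpl]
  simp only [List.nil_append]
  rfl
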